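-- pv_equiv track=rewrite | github.com/najib105q/AdventOfCode | src/day03/part02.py | max_joltage_from_bank_12
-- ===== SOURCE A (Python) =====
-- def max_joltage_from_bank_12(bank: str, k: int = 12) -> int:
--     stack = []
--     n = len(bank)
--     to_remove = n - k
--     for digit in bank:
--         while stack and to_remove > 0 and stack[-1] < digit:
--             stack.pop()
--             to_remove -= 1
--         stack.append(digit)
--     result_digits = stack[:k]
--     return int("".join(result_digits))
-- ===== SOURCE B (Python) =====
-- def max_joltage_from_bank_12(bank: str, k: int = 12) -> int:
--     n = len(bank)
--     if k >= n:
--         return int(bank)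
--     digits = []
--     rest = bank
--     for p in range(k):
--         window = rest[: len(rest) - (k - 1 - p)]
--         c = max(window)
--         digits.append(c)
--         rest = rest[window.index(c) + 1 :]
--     return int("".join(digits))
-- ===== Notes on version B (the rewrite author's own statement) =====
-- stated objective: alternative
-- what changed: Replaces the pop-budget stack greedy with direct window selection: each output digit is the leftmost maximum of the feasible window, after which the scan restarts past it; no stack and no removal budget are maintained.
-- outside the precondition, e.g. on max_joltage_from_bank_12('12 ', 2): A returns 2, B returns 2; on max_joltage_from_bank_12('21', -1): A returns 2, B raises ValueError
import Mathlib
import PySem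

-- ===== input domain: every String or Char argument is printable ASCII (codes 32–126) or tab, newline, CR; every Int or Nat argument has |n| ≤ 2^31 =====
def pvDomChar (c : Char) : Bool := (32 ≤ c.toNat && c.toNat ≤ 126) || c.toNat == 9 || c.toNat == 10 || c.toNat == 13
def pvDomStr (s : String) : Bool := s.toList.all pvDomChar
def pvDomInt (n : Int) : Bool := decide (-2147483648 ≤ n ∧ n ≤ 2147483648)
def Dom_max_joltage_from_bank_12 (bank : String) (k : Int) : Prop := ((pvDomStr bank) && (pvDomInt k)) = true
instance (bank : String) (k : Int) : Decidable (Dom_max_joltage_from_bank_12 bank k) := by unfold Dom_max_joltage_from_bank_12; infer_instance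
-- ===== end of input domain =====

-- B replaces the pop-budget stack greedy with direct window selection of each output digit (alternative decomposition, similar cost).

-- ===== PORT A =====
-- the inner 'while stack and to_remove > 0 and stack[-1] < digit: stack.pop(); to_remove -= 1'
-- (stack is kept reversed: head = top of the Python stack)
def popLoop (st : List Char) (r : Int) (d : Char) : List Char × Int :=
  match st with
  | [] => ([], r)
  | t :: rest => if r > 0 ∧ t < d then popLoop rest (r - 1) d else (t :: rest, r)

-- the outer 'for digit in bank' loop, state = (stack reversed, to_remove)
def runA (ds : List Char) (st : List Char) (r : Int) : List Char × Int :=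
  match ds with
  | [] => (st, r)
  | d :: ds' =>
    let p := popLoop st r d
    runA ds' (d :: p.1) p.2

def max_joltage_from_bank_12 (bank : String) (k : Int) : Int :=
  let cs := bank.toList
  let res := runA cs [] ((cs.length : Int) - k)
  -- int("".join(stack[:k])); int() raises outside Pre_, the port returns 0 there
  (PySem.Int.ofChars? (PySem.List.slice res.1.reverse none (some k))).getD 0

-- ===== PORT B =====
-- the 'for p in range(k)' loop of Source B, recursing on need = k - p
def pickB (cs : List Char) (need : Nat) : List Char :=
  match need with
  | 0 => []
  | Nat.succ m =>
    let w := cs.take (cs.length - m)       -- window = rest[: len(rest) - (k-1-p)]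
    match PySem.List.max? w (fun x => x) with   -- c = max(window)
    | none => []                                -- unreachable under Pre_ (max of '' raises)
    | some c =>
      match PySem.List.index? w c with          -- window.index(c)
      | none => []                              -- unreachable: c ∈ w
      | some i => c :: pickB (cs.drop (i + 1)) m

def max_joltage_from_bank_12_alt (bank : String) (k : Int) : Int :=
  let cs := bank.toList
  if (cs.length : Int) ≤ k then (PySem.Int.ofChars? cs).getD 0
  else (PySem.Int.ofChars? (pickB cs k.toNat)).getD 0

-- ===== PRECONDITION & SPEC =====
-- Pre_ requires k ≥ 1 and: if k covers the whole bank, that int(bank) succeeds; otherwise (a real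
-- selection happens) that the bank is all digits. It excludes k ≤ 0 (an unnatural request where A's
-- value comes from negative-slice wraparound) and non-digit banks under selection, where A returns
-- only when int() happens to accept the selected characters, an accident of int()'s lexical rules.
def Pre_max_joltage_from_bank_12 (bank : String) (k : Int) : Prop :=
  1 ≤ k ∧ ((bank.toList.length : Int) ≤ k → (PySem.Int.ofStr? bank).isSome = true) ∧
    (k < (bank.toList.length : Int) → bank.toList.all (fun c => decide ('0' ≤ c) && decide (c ≤ '9')) = true)
instance (bank : String) (k : Int) : Decidable (Pre_max_joltage_from_bank_12 bank k) := by
  unfold Pre_max_joltage_from_bank_12; infer_instance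

def pvWitness_max_joltage_from_bank_12 : String × Int := ("932", 2)

def Spec_max_joltage_from_bank_12 (bank : String) (k : Int) (out : Int) : Prop := out = max_joltage_from_bank_12_alt bank k
instance (bank : String) (k : Int) (out : Int) : Decidable (Spec_max_joltage_from_bank_12 bank k out) := by unfold Spec_max_joltage_from_bank_12; infer_instance

-- ===== CLAIM (what is proved, stated in full; the proofs are below) =====
def Claim_equal_max_joltage_from_bank_12 : Prop := ∀ (bank : String) (k : Int), Dom_max_joltage_from_bank_12 bank k → Pre_max_joltage_from_bank_12 bank k → Spec_max_joltage_from_bank_12 bank k (max_joltage_from_bank_12 bank k)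

-- ===== LEMMAS AND PROOFS =====

-- budget spent = elements popped
theorem popLoop_count (st : List Char) (r : Int) (d : Char) :
    (popLoop st r d).2 - ((popLoop st r d).1.length : Int) = r - st.length := by
  induction st generalizing r with
  | nil => simp [popLoop]
  | cons t rest ih =>
    simp only [popLoop]
    split
    · have := ih (r - 1); simp only [List.length_cons] at this ⊢; push_cast at this ⊢; omega
    · simp only [List.length_cons]

theorem popLoop_subset (st : List Char) (r : Int) (d : Char) :
    ∀ x ∈ (popLoop st r d).1, x ∈ st := by
  induction st generalizing r with
  | nil => simp [popLoop]
  | cons t rest ih =>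
    simp only [popLoop]
    split
    · intro x hx; exact List.mem_cons_of_mem _ (ih (r - 1) x hx)
    · intro x hx; exact hx

-- everything on the stack is < c and the budget suffices: the whole stack is popped
theorem popLoop_all_lt (st : List Char) (r : Int) (c : Char)
    (hlt : ∀ x ∈ st, x < c) (hb : (st.length : Int) ≤ r) :
    popLoop st r c = ([], r - st.length) := by
  induction st generalizing r with
  | nil => simp [popLoop]
  | cons t rest ih =>
    simp only [List.length_cons] at hb
    have h1 : r > 0 := by push_cast at hb; omega
    have h2 : t < c := hlt t List.mem_cons_self
    simp only [popLoop]
    rw [if_pos (⟨h1, h2⟩ : r > 0 ∧ t < c)]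
    rw [ih (r - 1) (fun x hx => hlt x (List.mem_cons_of_mem _ hx)) (by push_cast at hb ⊢; omega)]
    simp only [List.length_cons]; push_cast; ring_nf

-- a bottom element c survives popLoop if the budget could only reach it for a digit ≤ c
theorem popLoop_bottom (st : List Char) (r : Int) (d c : Char)
    (h : (st.length : Int) < r → d ≤ c) :
    popLoop (st ++ [c]) r d = ((popLoop st r d).1 ++ [c], (popLoop st r d).2) := by
  induction st generalizing r with
  | nil =>
    simp only [List.nil_append, popLoop]
    have : ¬ (r > 0 ∧ c < d) := by
      rintro ⟨h1, h2⟩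
      exact absurd (h (by simpa using h1)) (not_le.mpr h2)
    rw [if_neg this]
  | cons t rest ih =>
    simp only [List.cons_append, popLoop]
    split
    · exact ih (r - 1) (fun hl => h (by simp only [List.length_cons] at hl ⊢; push_cast at hl ⊢; omega))
    · rfl

theorem runA_append (xs ys st : List Char) (r : Int) :
    runA (xs ++ ys) st r = runA ys (runA xs st r).1 (runA xs st r).2 := by
  induction xs generalizing st r with
  | nil => simp [runA]
  | cons d ds ih => simp only [List.cons_append, runA]; exact ih _ _

theorem runA_count (xs : List Char) : ∀ (st : List Char) (r : Int),
    (runA xs st r).2 - ((runA xs st r).1.length : Int) = r - st.length - xs.length := by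
  induction xs with
  | nil => intro st r; simp [runA]
  | cons d ds ih =>
    intro st r
    simp only [runA]
    rw [ih]
    have := popLoop_count st r d
    simp only [List.length_cons] at this ⊢; push_cast at this ⊢; omega

theorem runA_subset (xs : List Char) : ∀ (st : List Char) (r : Int),
    ∀ x ∈ (runA xs st r).1, x ∈ st ∨ x ∈ xs := by
  induction xs with
  | nil => intro st r x hx; exact Or.inl hx
  | cons d ds ih =>
    intro st r x hx
    rcases ih _ _ x hx with h | h
    · rcases List.mem_cons.mp h with h | h
      · exact Or.inr (by simp [h])
      · exact Or.inl (popLoop_subset st r d x h)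
    · exact Or.inr (List.mem_cons_of_mem _ h)

-- with no budget nothing is ever popped
theorem popLoop_nonpos (st : List Char) (r : Int) (d : Char) (h : r ≤ 0) :
    popLoop st r d = (st, r) := by
  cases st with
  | nil => rfl
  | cons t rest => simp only [popLoop]; rw [if_neg (by rintro ⟨h1, _⟩; omega)]

theorem runA_nonpos (xs : List Char) : ∀ (st : List Char) (r : Int), r ≤ 0 →
    runA xs st r = (xs.reverse ++ st, r) := by
  induction xs with
  | nil => intro st r h; simp [runA]
  | cons d ds ih =>
    intro st r h
    simp only [runA, popLoop_nonpos st r d h]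
    rw [ih (d :: st) r h]
    simp

-- a bottom element c survives the whole run if every digit the budget can reach is ≤ c
theorem runA_bottom (c : Char) (rest : List Char) : ∀ (st : List Char) (r : Int),
    (∀ t (ht : t < rest.length), ((st.length : Int) + t < r) → rest[t] ≤ c) →
    runA rest (st ++ [c]) r = ((runA rest st r).1 ++ [c], (runA rest st r).2) := by
  induction rest with
  | nil => intro st r _; simp [runA]
  | cons d ds ih =>
    intro st r hsafe
    have h0 : (st.length : Int) < r → d ≤ c := by
      intro h; simpa using hsafe 0 (by simp) (by simpa using h)
    simp only [runA, popLoop_bottom st r d c h0]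
    rw [← List.cons_append, ih (d :: (popLoop st r d).1) (popLoop st r d).2 ?_]
    intro t ht hb
    have hc := popLoop_count st r d
    have hlt : ((st.length : Int) + (t + 1) < r) := by
      simp only [List.length_cons] at hb; push_cast at hb hc ⊢; omega
    simpa using hsafe (t + 1) (by simpa using Nat.succ_lt_succ ht) (by push_cast at hlt ⊢; omega)

-- main induction: the truncated stack result is the window-selection result
theorem stack_eq_pick (k : Nat) : ∀ (cs : List Char), k ≤ cs.length →
    (runA cs [] ((cs.length : Int) - k)).1.reverse.take k = pickB cs k := by
  induction k with
  | zero => intro cs _; simp [pickB]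
  | succ m ih =>
    intro cs hk
    -- the window and its leftmost maximum c at index i
    rcases hmax : PySem.List.max? (cs.take (cs.length - m)) (fun x => x) with _ | c
    · exfalso
      have hnil := (PySem.List.max?_eq_none_iff _ _).mp hmax
      have := congrArg List.length hnil
      simp only [List.length_take, List.length_nil] at this
      omega
    have hcmem : c ∈ cs.take (cs.length - m) := PySem.List.max?_mem hmax
    have hcmax : ∀ y ∈ cs.take (cs.length - m), y ≤ c := fun y hy => PySem.List.max?_isMax hmax y hy
    rcases hidx : PySem.List.index? (cs.take (cs.length - m)) c with _ | i
    · exact absurd ((PySem.List.index?_eq_none_iff _ _).mp hidx) (by simp [hcmem])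
    obtain ⟨hiw, hci, hfirst⟩ := PySem.List.getElem_of_index?_eq_some hidx
    have hiw' : i < cs.length - m := by simp only [List.length_take] at hiw; omega
    have hin : i < cs.length := by omega
    have hci' : cs[i] = c := by rw [← hci]; simp [List.getElem_take]
    have hdecomp : cs = cs.take i ++ c :: cs.drop (i + 1) := by
      conv_lhs => rw [← List.take_append_drop i cs]
      rw [List.drop_eq_getElem_cons hin, hci']
    -- every digit strictly before i is < c
    have hpre_lt : ∀ x ∈ cs.take i, x < c := by
      intro x hx
      obtain ⟨j, hj, rfl⟩ := List.getElem_of_mem hx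
      have hji : j < i := by simp only [List.length_take] at hj; omega
      have hjw : j < cs.length - m := by omega
      have hjn : j < cs.length := by omega
      have e1 : (cs.take i)[j] = cs[j] := by simp [List.getElem_take]
      have e2 : (cs.take (cs.length - m))[j]'(by simp [List.length_take]; omega) = cs[j] := by
        simp [List.getElem_take]
      have hne : cs[j] ≠ c := by rw [← e2]; exact hfirst j hji
      have hle : cs[j] ≤ c := by
        rw [← e2]; exact hcmax _ (List.getElem_mem _)
      rw [e1]; exact lt_of_le_of_ne hle hne
    -- A-side: run the prefix, pop it all on c, then c is a protected bottom
    have hkey : (runA cs [] ((cs.length : Int) - (↑(m + 1) : Int))).1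
        = (runA (cs.drop (i + 1)) [] (((cs.drop (i + 1)).length : Int) - (m : Int))).1 ++ [c] := by
      have h1 : runA cs [] ((cs.length : Int) - (↑(m + 1) : Int))
          = runA (cs.take i ++ c :: cs.drop (i + 1)) [] ((cs.length : Int) - (↑(m + 1) : Int)) := by
        rw [← hdecomp]
      rw [h1, runA_append]
      have hcnt := runA_count (cs.take i) [] ((cs.length : Int) - (↑(m + 1) : Int))
      simp only [List.length_nil, List.length_take] at hcnt
      have hall : ∀ x ∈ (runA (cs.take i) [] ((cs.length : Int) - (↑(m + 1) : Int))).1, x < c := by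
        intro x hx
        rcases runA_subset _ _ _ x hx with h | h
        · simp at h
        · exact hpre_lt x h
      have hble : (((runA (cs.take i) [] ((cs.length : Int) - (↑(m + 1) : Int))).1.length : Int))
          ≤ (runA (cs.take i) [] ((cs.length : Int) - (↑(m + 1) : Int))).2 := by
        push_cast at hcnt ⊢; omega
      simp only [runA]
      have hbud : (runA (cs.take i) [] ((cs.length : Int) - (↑(m + 1) : Int))).2
          - ((runA (cs.take i) [] ((cs.length : Int) - (↑(m + 1) : Int))).1.length : Int)
          = (((cs.drop (i + 1)).length : Int) - (m : Int)) := by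
        simp only [List.length_drop]
        push_cast at hcnt ⊢; omega
      have hpop : popLoop (runA (cs.take i) [] ((cs.length : Int) - (↑(m + 1) : Int))).1
            (runA (cs.take i) [] ((cs.length : Int) - (↑(m + 1) : Int))).2 c
          = ([], ((cs.drop (i + 1)).length : Int) - (m : Int)) := by
        rw [popLoop_all_lt _ _ _ hall hble, hbud]
      have hsafe : ∀ t (ht : t < (cs.drop (i + 1)).length),
          ((([] : List Char).length : Int) + t < ((cs.drop (i + 1)).length : Int) - (m : Int)) →
          (cs.drop (i + 1))[t] ≤ c := by
        intro t ht hb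
        simp only [List.length_nil, Nat.cast_zero, zero_add, List.length_drop] at hb ht
        have htw : i + 1 + t < cs.length - m := by omega
        have e3 : (cs.drop (i + 1))[t]'(by simp [List.length_drop]; omega)
            = cs[i + 1 + t]'(by omega) := by simp [List.getElem_drop]
        have e4 : (cs.take (cs.length - m))[i + 1 + t]'(by simp [List.length_take]; omega)
            = cs[i + 1 + t]'(by omega) := by simp [List.getElem_take]
        rw [e3, ← e4]
        exact hcmax _ (List.getElem_mem _)
      rw [hpop]
      rw [show (c :: ([] : List Char)) = ([] : List Char) ++ [c] from rfl]
      rw [runA_bottom c _ [] _ hsafe]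
      simp
    rw [hkey]
    simp only [List.reverse_append, List.reverse_cons, List.reverse_nil, List.nil_append,
      List.cons_append, List.take_succ_cons]
    rw [ih _ (by simp only [List.length_drop]; omega)]
    simp only [pickB, hmax, hidx]

-- ===== VERDICT (by name: the statement is the Claim_ definition above) =====
theorem max_joltage_from_bank_12_spec : Claim_equal_max_joltage_from_bank_12 := by
  intro bank k _ hpre
  obtain ⟨hk1, -, -⟩ := hpre
  unfold Spec_max_joltage_from_bank_12
  simp only [max_joltage_from_bank_12, max_joltage_from_bank_12_alt]
  by_cases hbig : (bank.toList.length : Int) ≤ k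
  · rw [if_pos hbig, runA_nonpos _ _ _ (by omega)]
    simp only [List.append_nil, List.reverse_reverse]
    rw [PySem.List.slice_to _ (by omega : (0:Int) ≤ k)]
    rw [List.take_of_length_le (by omega : bank.toList.length ≤ k.toNat)]
  · rw [if_neg hbig]
    push Not at hbig
    have hkn : k.toNat ≤ bank.toList.length := by omega
    have hcast : ((k.toNat : Int)) = k := Int.toNat_of_nonneg (by omega)
    have hst := stack_eq_pick k.toNat bank.toList hkn
    rw [hcast] at hst
    rw [PySem.List.slice_to _ (by omega : (0:Int) ≤ k), hst]
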